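-- pv_equiv track=rewrite | github.com/agustin-Sanchez9/algorithms | solutions/1-solution.py | escalera
-- ===== SOURCE A (Python) =====
-- n = 2
--
-- def escalera(instr,h):
-- 	i = 0
-- 	suma = 0
-- 	pasos = 0
-- 	while suma < h:
-- 		suma += instr[i]
-- 		pasos += 1
-- 		i = (i+1) % n
-- 	return pasos
-- ===== SOURCE B (Python) =====
-- def escalera(instr, h):
--     if h <= 0:
--         return 0
--     a = instr[0]
--     if a >= h:
--         return 1
--     b = instr[1]
--     s = a + b
--     # ceil division: smallest k with k*s >= x is -((-x) // s) for s > 0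
--     k1 = -((-h) // s)          # min even-step count / 2 reaching h
--     k2 = -(-(h - a) // s)      # min k with k*s + a >= h (odd steps 2k+1)
--     return min(2 * k1, 2 * k2 + 1)
-- ===== Notes on version B (the rewrite author's own statement) =====
-- stated objective: alternative
-- what changed: Replaces the step-by-step accumulation loop with a closed-form ceiling-division formula over the pair sum instr[0]+instr[1], taking the minimum of the even and odd step counts.
import Mathlib
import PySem

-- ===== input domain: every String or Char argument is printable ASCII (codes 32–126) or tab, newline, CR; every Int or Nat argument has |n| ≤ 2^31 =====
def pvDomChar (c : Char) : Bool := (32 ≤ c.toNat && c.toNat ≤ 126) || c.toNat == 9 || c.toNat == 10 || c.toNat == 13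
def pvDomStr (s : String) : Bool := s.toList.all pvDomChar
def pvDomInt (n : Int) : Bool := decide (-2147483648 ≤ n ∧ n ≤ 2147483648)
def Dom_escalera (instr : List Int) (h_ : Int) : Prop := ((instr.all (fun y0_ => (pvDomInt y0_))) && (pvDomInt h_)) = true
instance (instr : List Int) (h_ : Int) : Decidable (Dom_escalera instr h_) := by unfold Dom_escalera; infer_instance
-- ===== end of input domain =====

-- B replaces A's step-by-step accumulation loop by a closed-form ceiling-division formula.

-- ===== PORT A =====
-- Python's while loop, fuel-bounded; under Pre_ the fuel 2*h+2 strictly exceeds the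
-- number of iterations the Python loop performs, so the port computes exactly A's value.
def escaleraLoop (instr : List Int) (h_ : Int) : Nat → Nat → Int → Int → Int
  | 0, _, _, pasos => pasos
  | fuel + 1, i, suma, pasos =>
    if suma < h_ then
      escaleraLoop instr h_ fuel ((i + 1) % 2) (suma + (PySem.List.pyGet? instr (i : Int)).getD 0) (pasos + 1)
    else pasos

def escalera (instr : List Int) (h_ : Int) : Int :=
  escaleraLoop instr h_ (2 * h_.toNat + 2) 0 0 0

-- ===== PORT B =====
def escalera_alt (instr : List Int) (h_ : Int) : Int :=
  if h_ ≤ 0 then 0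
  else
    let a := (PySem.List.pyGet? instr 0).getD 0
    if h_ ≤ a then 1
    else
      let b := (PySem.List.pyGet? instr 1).getD 0
      let s := a + b
      let k1 := -(PySem.Int.floordiv (-h_) s)
      let k2 := -(PySem.Int.floordiv (-(h_ - a)) s)
      min (2 * k1) (2 * k2 + 1)

-- ===== PRECONDITION & SPEC =====
-- Pre_ = exactly the inputs where the Python A returns: otherwise it raises IndexError
-- (instr too short while the sum is still below h) or loops forever (step-pair sum ≤ 0
-- and the first step does not reach h).
def Pre_escalera (instr : List Int) (h_ : Int) : Prop :=
  h_ ≤ 0 ∨ (instr ≠ [] ∧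
    (h_ ≤ (PySem.List.pyGet? instr 0).getD 0 ∨
      (2 ≤ instr.length ∧
        0 < (PySem.List.pyGet? instr 0).getD 0 + (PySem.List.pyGet? instr 1).getD 0)))
instance (instr : List Int) (h_ : Int) : Decidable (Pre_escalera instr h_) := by
  unfold Pre_escalera; infer_instance

def pvWitness_escalera : List Int × Int := ([3, 4], 10)

def Spec_escalera (instr : List Int) (h_ : Int) (out : Int) : Prop := out = escalera_alt instr h_
instance (instr : List Int) (h_ : Int) (out : Int) : Decidable (Spec_escalera instr h_ out) := by
  unfold Spec_escalera; infer_instance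

-- ===== CLAIM (what is proved, stated in full; the proofs are below) =====
def Claim_equal_escalera : Prop := ∀ (instr : List Int) (h_ : Int), Dom_escalera instr h_ → Pre_escalera instr h_ → Spec_escalera instr h_ (escalera instr h_)

-- ===== LEMMAS AND PROOFS =====

-- closed form of the loop's running sum after n steps
def fsum (a b : Int) (n : Nat) : Int := ((n / 2 : Nat) : Int) * (a + b) + ((n % 2 : Nat) : Int) * a

lemma loop_step (instr : List Int) (h_ : Int) (fuel i : Nat) (suma pasos : Int)
    (h : suma < h_) :
    escaleraLoop instr h_ (fuel + 1) i suma pasos =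
      escaleraLoop instr h_ fuel ((i + 1) % 2)
        (suma + (PySem.List.pyGet? instr (i : Int)).getD 0) (pasos + 1) := by
  simp [escaleraLoop, h]

lemma loop_stop (instr : List Int) (h_ : Int) (fuel i : Nat) (suma pasos : Int)
    (h : ¬ suma < h_) :
    escaleraLoop instr h_ fuel i suma pasos = pasos := by
  cases fuel <;> simp [escaleraLoop, h]

lemma fsum_step (a b : Int) (n : Nat) :
    fsum a b (n + 1) = fsum a b n + (if n % 2 = 0 then a else b) := by
  obtain ⟨k, hk | hk⟩ := Nat.even_or_odd' n
  · subst hk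
    have h1 : (2 * k + 1) / 2 = k := by omega
    have h2 : (2 * k) / 2 = k := by omega
    have h3 : (2 * k + 1) % 2 = 1 := by omega
    have h4 : (2 * k) % 2 = 0 := by omega
    simp [fsum, h1, h2, h3, h4]
  · subst hk
    have h1 : (2 * k + 1 + 1) / 2 = k + 1 := by omega
    have h2 : (2 * k + 1) / 2 = k := by omega
    have h3 : (2 * k + 1 + 1) % 2 = 0 := by omega
    have h4 : (2 * k + 1) % 2 = 1 := by omega
    simp [fsum, h1, h2, h3, h4]; ring

-- ceiling division bracket: -((-x) // s) ≤ k ↔ x ≤ k * s  (0 < s)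
lemma ceil_le_iff (x s k : Int) (hs : 0 < s) :
    -(PySem.Int.floordiv (-x) s) ≤ k ↔ x ≤ k * s := by
  rw [neg_le, PySem.Int.le_floordiv_iff_mul_le hs]
  constructor <;> intro h <;> nlinarith [h]

-- the loop returns N, the first step count whose running sum reaches h_
lemma loop_min (instr : List Int) (h_ a b : Int) (N : Nat)
    (ha : (PySem.List.pyGet? instr 0).getD 0 = a)
    (hb : (PySem.List.pyGet? instr 1).getD 0 = b)
    (hstop : h_ ≤ fsum a b N)
    (hlt : ∀ m : Nat, m < N → fsum a b m < h_) :
    ∀ (fuel n : Nat), n ≤ N → N ≤ n + fuel →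
      escaleraLoop instr h_ fuel (n % 2) (fsum a b n) n = (N : Int) := by
  intro fuel
  induction fuel with
  | zero =>
    intro n h1 h2
    have : n = N := by omega
    simp [escaleraLoop, this]
  | succ fuel ih =>
    intro n h1 h2
    by_cases hc : fsum a b n < h_
    · have hnN : n ≠ N := by intro h; rw [h] at hc; omega
      have hn : n < N := by omega
      have hidx : (PySem.List.pyGet? instr ((n % 2 : Nat) : Int)).getD 0 =
          (if n % 2 = 0 then a else b) := by
        rcases Nat.mod_two_eq_zero_or_one n with h | h <;> simp [h, ha, hb]
      have hsum : fsum a b n + (PySem.List.pyGet? instr ((n % 2 : Nat) : Int)).getD 0 =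
          fsum a b (n + 1) := by rw [hidx, fsum_step]
      have hmod : (n % 2 + 1) % 2 = (n + 1) % 2 := by omega
      rw [loop_step _ _ _ _ _ _ hc, hsum, hmod]
      have := ih (n + 1) (by omega) (by omega)
      have hpc : ((n : Int) + 1) = ((n + 1 : Nat) : Int) := by push_cast; ring
      rw [hpc]
      exact this
    · have hn : n = N := by
        by_contra h
        exact hc (hlt n (by omega))
      subst hn
      rw [loop_stop _ _ _ _ _ _ hc]

theorem escalera_spec : Claim_equal_escalera := by
  intro instr h_ _ hpre
  unfold Spec_escalera
  by_cases h0 : h_ ≤ 0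
  · -- loop condition false immediately
    have hrhs : escalera_alt instr h_ = 0 := by simp [escalera_alt, h0]
    rw [hrhs]
    unfold escalera
    rw [loop_stop _ _ _ _ _ _ (by omega)]
  · set a := (PySem.List.pyGet? instr 0).getD 0 with ha
    set b := (PySem.List.pyGet? instr 1).getD 0 with hb
    have hfuel : 2 * h_.toNat + 2 = 2 * h_.toNat + 1 + 1 := rfl
    have hcast0 : ((0 : Nat) : Int) = 0 := by norm_num
    by_cases hA : h_ ≤ a
    · -- one iteration: suma becomes a ≥ h_
      have hrhs : escalera_alt instr h_ = 1 := by
        simp only [escalera_alt]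
        rw [if_neg h0, if_pos (ha ▸ hA)]
      rw [hrhs]
      unfold escalera
      rw [hfuel, loop_step _ _ _ _ _ _ (by omega : (0:Int) < h_)]
      rw [loop_stop _ _ _ _ _ _ (by rw [hcast0, ← ha]; omega)]
      norm_num
    · -- main case: s = a + b > 0, closed form
      rcases hpre with h | ⟨_, h | ⟨_, hs⟩⟩
      · omega
      · exact absurd h hA
      rw [← ha, ← hb] at hs
      set s := a + b with hsdef
      set k1 : Int := -(PySem.Int.floordiv (-h_) s) with hk1
      set k2 : Int := -(PySem.Int.floordiv (-(h_ - a)) s) with hk2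
      have hch1 : ∀ k : Int, k1 ≤ k ↔ h_ ≤ k * s := fun k => ceil_le_iff h_ s k hs
      have hch2 : ∀ k : Int, k2 ≤ k ↔ h_ - a ≤ k * s := fun k => ceil_le_iff (h_ - a) s k hs
      have hk1pos : 0 < k1 := by
        by_contra h
        have := (hch1 0).mp (by omega)
        omega
      have hk2pos : 0 < k2 := by
        by_contra h
        have := (hch2 0).mp (by omega)
        omega
      set K1 : Nat := k1.toNat with hK1
      set K2 : Nat := k2.toNat with hK2
      have hcK1 : (K1 : Int) = k1 := Int.toNat_of_nonneg (by omega)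
      have hcK2 : (K2 : Int) = k2 := Int.toNat_of_nonneg (by omega)
      have hveven : ∀ k : Nat, fsum a b (2 * k) = (k : Int) * s := by
        intro k
        unfold fsum
        rw [(by omega : (2 * k) / 2 = k), (by omega : (2 * k) % 2 = 0), ← hsdef]
        simp
      have hvodd : ∀ k : Nat, fsum a b (2 * k + 1) = (k : Int) * s + a := by
        intro k
        unfold fsum
        rw [(by omega : (2 * k + 1) / 2 = k), (by omega : (2 * k + 1) % 2 = 1), ← hsdef]
        simp
      set N : Nat := min (2 * K1) (2 * K2 + 1) with hN
      have hstop : h_ ≤ fsum a b N := by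
        rcases le_total (2 * K1) (2 * K2 + 1) with h | h
        · rw [(by omega : N = 2 * K1), hveven K1, hcK1]
          exact (hch1 k1).mp le_rfl
        · rw [(by omega : N = 2 * K2 + 1), hvodd K2, hcK2]
          have := (hch2 k2).mp le_rfl
          omega
      have hlt : ∀ m : Nat, m < N → fsum a b m < h_ := by
        intro m hm
        obtain ⟨k, hk | hk⟩ := Nat.even_or_odd' m <;> subst hk
        · have : ¬ (k1 ≤ (k : Int)) := by omega
          have hv := (hch1 (k : Int)).not.mp this
          rw [hveven k]; omega
        · have : ¬ (k2 ≤ (k : Int)) := by omega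
          have hv := (hch2 (k : Int)).not.mp this
          rw [hvodd k]; omega
      have hk1h : k1 ≤ h_ := by
        rw [hch1]; nlinarith
      have hK1le : K1 ≤ h_.toNat := by omega
      have hNfuel : N ≤ 0 + (2 * h_.toNat + 2) := by omega
      have hmain := loop_min instr h_ a b N ha.symm hb.symm hstop hlt
        (2 * h_.toNat + 2) 0 (by omega) hNfuel
      have hf0 : fsum a b 0 = 0 := by simp [fsum]
      rw [hf0] at hmain
      simp only [Nat.zero_mod, Nat.cast_zero] at hmain
      have hrhs : escalera_alt instr h_ = min (2 * k1) (2 * k2 + 1) := by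
        simp only [escalera_alt]
        rw [if_neg h0, if_neg (ha ▸ hA), ← ha, ← hb, ← hsdef, ← hk1, ← hk2]
      rw [hrhs]
      unfold escalera
      rw [hmain, hN]
      push_cast [hcK1, hcK2]
      omega
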